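-- pv_equiv track=rewrite | github.com/sskender/analysis-of-massive-datasets | lab1/SimHashBuckets.py | create_lsh_buckets
-- ===== SOURCE A (Python) =====
-- def create_lsh_buckets(document_hash_list, b=8):
--     candidates = {}
--     band_size = 128 // b
--     for i in range(0, 128, band_size):
--         buckets = {}
--         for document_id in range(len(document_hash_list)):
--             document_hash = document_hash_list[document_id]
--             bits = bin(int(document_hash, 16))[2:]
--             bits = bits.rjust(128, "0")
--             band_bits = bits[i:i+band_size]
--             band_int = int(band_bits, 2)
--             bucket_documents = set()
--             if band_int in buckets:
--                 bucket_documents = buckets[band_int]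
--                 for bucket_document_id in bucket_documents:
--                     if document_id not in candidates:
--                         candidates[document_id] = set([bucket_document_id])
--                     else:
--                         candidates[document_id].add(bucket_document_id)
--                     if bucket_document_id not in candidates:
--                         candidates[bucket_document_id] = set([document_id])
--                     else:
--                         candidates[bucket_document_id].add(document_id)
--             bucket_documents.add(document_id)
--             buckets[band_int] = bucket_documents
--     return candidates
-- ===== SOURCE B (Python) =====
-- def create_lsh_buckets(document_hash_list, b=8):
--     candidates = {}
--     band_size = 128 // b
--     if band_size <= 0:
--         return candidates
--     # compute each document's padded 128-bit string once, not once per band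
--     bits_list = [bin(int(h, 16))[2:].rjust(128, "0") for h in document_hash_list]
--     for i in range(0, 128, band_size):
--         bands = [int(bits[i:i + band_size], 2) for bits in bits_list]
--         # no buckets dict: two documents collide in this band iff their band ints are equal
--         for d in range(len(bands)):
--             for e in range(d):
--                 if bands[e] == bands[d]:
--                     candidates.setdefault(d, set()).add(e)
--                     candidates.setdefault(e, set()).add(d)
--     return candidates
-- ===== Notes on version B (the rewrite author's own statement) =====
-- stated objective: simpler
-- what changed: B drops A's interleaved per-band buckets dict entirely: it precomputes each document's padded 128-bit string once, then per band detects collisions by directly comparing each document's band integer with every earlier document's, emitting both candidate-set updates via setdefault.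
import Mathlib
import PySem

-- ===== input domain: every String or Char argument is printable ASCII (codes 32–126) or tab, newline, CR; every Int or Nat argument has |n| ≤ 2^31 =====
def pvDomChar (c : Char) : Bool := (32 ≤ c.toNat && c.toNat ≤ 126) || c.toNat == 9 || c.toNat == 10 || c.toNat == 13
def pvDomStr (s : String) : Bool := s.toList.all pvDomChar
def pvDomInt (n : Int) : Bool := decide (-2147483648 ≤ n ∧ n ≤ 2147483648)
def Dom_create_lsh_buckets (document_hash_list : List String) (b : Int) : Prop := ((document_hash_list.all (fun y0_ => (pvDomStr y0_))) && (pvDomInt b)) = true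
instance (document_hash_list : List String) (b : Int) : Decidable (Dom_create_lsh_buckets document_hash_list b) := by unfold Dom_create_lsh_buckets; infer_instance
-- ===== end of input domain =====

-- B replaces A's interleaved bucket-dict streaming by precomputing each document's 128-bit string once and,
-- per band, a direct pairwise scan of band integers (no buckets dict): objective = simpler.


-- ===== PORT A =====
-- shared low-level helpers (both Pythons contain these very expressions):
-- bits = bin(int(h,16))[2:].rjust(128,"0").  int(h,16) = none is a ValueError, excluded by Pre_;
-- toBinChars = bin(v)[2:] exactly for v ≥ 0 (negative v is excluded by Pre_: A's later int(band,2) raises);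
-- rjust(128,'0') on an unsigned digit string is the left pad written out.
def pvHexBits (h : String) : List Char :=
  let bits := PySem.Int.toBinChars ((PySem.Int.ofStrBase? h 16).getD 0)
  List.replicate (128 - bits.length) '0' ++ bits

-- int(s, 2): exact on '0'/'1'-only strings, which every band slice of pvHexBits is (Pre_ keeps values ≥ 0)
def pvParseBin (cs : List Char) : Int :=
  cs.foldl (fun acc c => 2 * acc + (if c = '1' then 1 else 0)) 0

-- band_int = int(bits[i:i+band_size], 2)
def pvBandInt (bits : List Char) (i band_size : Int) : Int :=
  pvParseBin (PySem.List.slice bits (some i) (some (i + band_size)))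

-- the two candidate-dict updates A makes for the pair (document_id, bucket_document_id)
def pvPairA (document_id : Int) (c : PySem.Dict Int (PySem.Set Int)) (bucket_document_id : Int) :
    PySem.Dict Int (PySem.Set Int) :=
  let c1 := if c.contains document_id = false
            then c.insert document_id (PySem.Set.ofList [bucket_document_id])
            else c.insert document_id (PySem.Set.add (c.getD document_id PySem.Set.empty) bucket_document_id)
  if c1.contains bucket_document_id = false
  then c1.insert bucket_document_id (PySem.Set.ofList [document_id])
  else c1.insert bucket_document_id (PySem.Set.add (c1.getD bucket_document_id PySem.Set.empty) document_id)

-- A's per-document body: look the band bucket up, pair with its members, then put document_id into it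
def pvStepA (document_hash_list : List String) (i band_size : Int)
    (st : PySem.Dict Int (PySem.Set Int) × PySem.Dict Int (PySem.Set Int)) (document_id : Int) :
    PySem.Dict Int (PySem.Set Int) × PySem.Dict Int (PySem.Set Int) :=
  let document_hash := (PySem.List.pyGet? document_hash_list document_id).getD ""  -- index always in range
  let band_int := pvBandInt (pvHexBits document_hash) i band_size
  match st.1.get? band_int with
  | some bucket_documents =>
      (st.1.insert band_int (PySem.Set.add bucket_documents document_id),
       bucket_documents.foldl (pvPairA document_id) st.2)
  | none => (st.1.insert band_int (PySem.Set.add PySem.Set.empty document_id), st.2)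

def create_lsh_buckets (document_hash_list : List String) (b : Int) : List (Int × List Int) :=
  let band_size := PySem.Int.floordiv 128 b
  ((PySem.List.pyRange 0 128 band_size).foldl
    (fun candidates i =>
      ((PySem.List.pyRange 0 (document_hash_list.length : Int) 1).foldl
        (pvStepA document_hash_list i band_size) (PySem.Dict.empty, candidates)).2)
    (PySem.Dict.empty : PySem.Dict Int (PySem.Set Int))).items

-- ===== PORT B =====
-- candidates.setdefault(d, set()).add(e) twice: Dict.modify k dflt f is exactly d[k] = f(d.get(k, dflt))
def pvPairB (c : PySem.Dict Int (PySem.Set Int)) (d e : Int) : PySem.Dict Int (PySem.Set Int) :=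
  (c.modify d PySem.Set.empty (fun s => PySem.Set.add s e)).modify e PySem.Set.empty (fun s => PySem.Set.add s d)

-- B's per-document body: compare band ints directly with every earlier document
def pvStepB (bands : List Int) (c : PySem.Dict Int (PySem.Set Int)) (d : Int) :
    PySem.Dict Int (PySem.Set Int) :=
  (PySem.List.pyRange 0 d 1).foldl
    (fun c e => if (PySem.List.pyGet? bands e).getD 0 = (PySem.List.pyGet? bands d).getD 0
                then pvPairB c d e else c) c  -- both indices always in range

def create_lsh_buckets_alt (document_hash_list : List String) (b : Int) : List (Int × List Int) :=
  let band_size := PySem.Int.floordiv 128 b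
  if band_size ≤ 0 then [] else
  let bits_list := document_hash_list.map pvHexBits
  ((PySem.List.pyRange 0 128 band_size).foldl
    (fun candidates i =>
      let bands := bits_list.map (fun bits => pvBandInt bits i band_size)
      (PySem.List.pyRange 0 (bands.length : Int) 1).foldl (pvStepB bands) candidates)
    (PySem.Dict.empty : PySem.Dict Int (PySem.Set Int))).items

-- ===== PRECONDITION & SPEC =====
-- Pre_ = exactly where Python A returns: b ≠ 0 (no ZeroDivisionError), 128//b ≠ 0 (no range(0,128,0) ValueError),
-- and when the band loop is non-empty (128//b > 0) every string must be valid hex with a non-negative value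
-- (int(h,16) ValueError, or bin(-v) putting 'b'/'-' into a band so int(band,2) raises ValueError).
def Pre_create_lsh_buckets (document_hash_list : List String) (b : Int) : Prop :=
  b ≠ 0 ∧ PySem.Int.floordiv 128 b ≠ 0 ∧
  (0 < PySem.Int.floordiv 128 b →
    (document_hash_list.all (fun s => decide (0 ≤ (PySem.Int.ofStrBase? s 16).getD (-1)))) = true)
instance (document_hash_list : List String) (b : Int) : Decidable (Pre_create_lsh_buckets document_hash_list b) := by
  unfold Pre_create_lsh_buckets; infer_instance

def pvWitness_create_lsh_buckets : List String × Int := (["a3", "ff", "0x_1F", " a3 "], 32)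

def Spec_create_lsh_buckets (document_hash_list : List String) (b : Int) (out : List (Int × List Int)) : Prop := out = create_lsh_buckets_alt document_hash_list b
instance (document_hash_list : List String) (b : Int) (out : List (Int × List Int)) : Decidable (Spec_create_lsh_buckets document_hash_list b out) := by unfold Spec_create_lsh_buckets; infer_instance

-- ===== CLAIM (what is proved, stated in full; the proofs are below) =====
def Claim_equal_create_lsh_buckets : Prop := ∀ (document_hash_list : List String) (b : Int), Dom_create_lsh_buckets document_hash_list b → Pre_create_lsh_buckets document_hash_list b → Spec_create_lsh_buckets document_hash_list b (create_lsh_buckets document_hash_list b)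

-- ===== LEMMAS AND PROOFS =====
-- abstract versions of the two per-document bodies, over an arbitrary band function g
def pvStepAg (g : Int → Int) (st : PySem.Dict Int (PySem.Set Int) × PySem.Dict Int (PySem.Set Int))
    (d : Int) : PySem.Dict Int (PySem.Set Int) × PySem.Dict Int (PySem.Set Int) :=
  match st.1.get? (g d) with
  | some bucket_documents =>
      (st.1.insert (g d) (PySem.Set.add bucket_documents d),
       bucket_documents.foldl (pvPairA d) st.2)
  | none => (st.1.insert (g d) (PySem.Set.add PySem.Set.empty d), st.2)

def pvStepBg (g : Int → Int) (c : PySem.Dict Int (PySem.Set Int)) (d : Int) :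
    PySem.Dict Int (PySem.Set Int) :=
  (PySem.List.pyRange 0 d 1).foldl (fun c e => if g e = g d then pvPairB c d e else c) c

-- the bucket a key k holds after the first n documents: exactly the earlier documents with band k, in order
def pvBucketL (g : Int → Int) (n : Nat) (k : Int) : List Int :=
  ((List.range n).map (fun e : Nat => (e : Int))).filter (fun e => g e = k)

def pvBK (g : Int → Int) (n : Nat) : PySem.Dict Int (PySem.Set Int) :=
  ((List.range n).map (fun e : Nat => (e : Int))).foldl
    (fun bk d => bk.modify (g d) PySem.Set.empty (fun s => PySem.Set.add s d)) PySem.Dict.empty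

theorem pvHalf (c : PySem.Dict Int (PySem.Set Int)) (d e : Int) :
    (if c.contains d = false
     then c.insert d (PySem.Set.ofList [e])
     else c.insert d (PySem.Set.add (c.getD d PySem.Set.empty) e))
    = c.modify d PySem.Set.empty (fun s => PySem.Set.add s e) := by
  simp only [PySem.Dict.modify]
  by_cases h : c.contains d = false
  · rw [if_pos h, PySem.Dict.getD_of_not_contains (h := h)]
    rfl
  · rw [if_neg h]

theorem pvPair_eq (c : PySem.Dict Int (PySem.Set Int)) (d e : Int) :
    pvPairA d c e = pvPairB c d e := by
  unfold pvPairA pvPairB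
  rw [pvHalf, pvHalf]

theorem pvBucketL_lt (g : Int → Int) (n : Nat) (k : Int) :
    ∀ x ∈ pvBucketL g n k, x < (n : Int) := by
  intro x hx
  have hm := (List.mem_filter.mp hx).1
  obtain ⟨e, he, rfl⟩ := List.mem_map.mp hm
  exact_mod_cast List.mem_range.mp he

theorem pvBucketL_succ (g : Int → Int) (n : Nat) (k : Int) :
    pvBucketL g (n+1) k = pvBucketL g n k ++ (if g (n : Int) = k then [(n : Int)] else []) := by
  simp only [pvBucketL, List.range_succ, List.map_append, List.filter_append]
  by_cases h : g (n : Int) = k <;> simp [h]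

theorem pvBK_succ (g : Int → Int) (n : Nat) :
    pvBK g (n+1) = (pvBK g n).modify (g (n : Int)) PySem.Set.empty (fun s => PySem.Set.add s (n : Int)) := by
  simp [pvBK, List.range_succ]

theorem pvBK_get? (g : Int → Int) (n : Nat) (k : Int) :
    (pvBK g n).get? k = if pvBucketL g n k = [] then none else some (pvBucketL g n k) := by
  induction n with
  | zero => simp [pvBK, pvBucketL, PySem.Dict.get?_empty]
  | succ n ih =>
    rw [pvBK_succ, PySem.Dict.modify, PySem.Dict.get?_insert, pvBucketL_succ]
    by_cases h : k = g (n : Int)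
    · rw [if_pos h, ← h]
      have hget : (pvBK g n).getD k PySem.Set.empty = pvBucketL g n k := by
        rw [PySem.Dict.getD_eq_get?_getD, ih]
        by_cases h0 : pvBucketL g n k = [] <;> simp [h0, PySem.Set.empty]
      rw [hget]
      have hc : ¬ (PySem.Set.contains (pvBucketL g n k) (n : Int) = true) := by
        simp only [PySem.Set.contains, List.contains_eq_mem, decide_eq_true_eq]
        intro hmem
        have := pvBucketL_lt g n k _ hmem
        omega
      rw [show PySem.Set.add (pvBucketL g n k) (n : Int) = pvBucketL g n k ++ [(n : Int)] from
        by rw [PySem.Set.add, if_neg hc]]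
      rw [if_pos rfl, if_neg (by simp)]
    · have h' : ¬ g (n : Int) = k := fun hh => h hh.symm
      rw [if_neg h, if_neg h', List.append_nil, ih]

theorem pvStepBg_eq (g : Int → Int) (c : PySem.Dict Int (PySem.Set Int)) (n : Nat) :
    pvStepBg g c (n : Int)
      = (pvBucketL g n (g (n : Int))).foldl (fun c e => pvPairB c (n : Int) e) c := by
  unfold pvStepBg
  rw [PySem.List.pyRange_zero_natCast]
  rw [PySem.List.foldl_ite_eq_foldl_filter (p := fun e => g e = g (n : Int))
    (f := fun c e => pvPairB c (n : Int) e)]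
  rfl

theorem pvInner_eq (g : Int → Int) (n : Nat) (c : PySem.Dict Int (PySem.Set Int)) :
    ((List.range n).map (fun e : Nat => (e : Int))).foldl (pvStepAg g) (PySem.Dict.empty, c)
      = (pvBK g n, ((List.range n).map (fun e : Nat => (e : Int))).foldl (pvStepBg g) c) := by
  induction n with
  | zero => simp [pvBK]
  | succ n ih =>
    rw [List.range_succ, List.map_append, List.foldl_append, List.foldl_append, ih]
    simp only [List.map_cons, List.map_nil, List.foldl_cons, List.foldl_nil]
    rw [pvStepBg_eq, pvBK_succ, PySem.Dict.modify]
    unfold pvStepAg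
    rw [pvBK_get?]
    by_cases h0 : pvBucketL g n (g (n : Int)) = []
    · rw [if_pos h0]
      have hget : (pvBK g n).getD (g (n : Int)) PySem.Set.empty = PySem.Set.empty := by
        rw [PySem.Dict.getD_eq_get?_getD, pvBK_get?, if_pos h0]; rfl
      rw [hget, h0]
      rfl
    · rw [if_neg h0]
      have hget : (pvBK g n).getD (g (n : Int)) PySem.Set.empty = pvBucketL g n (g (n : Int)) := by
        rw [PySem.Dict.getD_eq_get?_getD, pvBK_get?, if_neg h0]; rfl
      rw [hget]
      refine Eq.trans (b := ((pvBK g n).insert (g (n : Int)) (PySem.Set.add (pvBucketL g n (g (n : Int))) (n : Int)),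
        List.foldl (pvPairA (n : Int))
          (List.foldl (pvStepBg g) c (List.map (fun e : Nat => (e : Int)) (List.range n)))
          (pvBucketL g n (g (n : Int))))) rfl ?_
      congr 1
      exact PySem.List.foldl_congr_mem _ _ _ _ (fun acc x _ => pvPair_eq acc _ x)

-- range(0, 128, step) is empty for a negative step
theorem pvRange_neg (s : Int) (hs : s < 0) : PySem.List.pyRange 0 128 s = [] := by
  unfold PySem.List.pyRange
  rw [if_neg hs.ne, if_neg (by omega : ¬ (0:Int) < s), if_neg (by omega : ¬ (128:Int) < (0:Int))]
  rfl

-- the band of document m read off the precomputed bands list is the band A computes from the hash list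
theorem pvBandAt (l : List String) (i bsz : Int) (m : Nat) (hm : m < l.length) :
    (PySem.List.pyGet? ((l.map pvHexBits).map (fun bits => pvBandInt bits i bsz)) (m : Int)).getD 0
      = pvBandInt (pvHexBits ((PySem.List.pyGet? l (m : Int)).getD "")) i bsz := by
  rw [PySem.List.pyGet?_natCast, PySem.List.pyGet?_natCast]
  rw [List.getElem?_map, List.getElem?_map, List.getElem?_eq_getElem hm]
  rfl

-- ===== VERDICT (by name: the statement is the Claim_ definition above) =====
theorem create_lsh_buckets_spec : Claim_equal_create_lsh_buckets := by
  intro l b hDom hPre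
  obtain ⟨hb, hfd, -⟩ := hPre
  unfold Spec_create_lsh_buckets
  simp only [create_lsh_buckets, create_lsh_buckets_alt]
  by_cases hpos : 0 < PySem.Int.floordiv 128 b
  · rw [if_neg (by omega)]
    congr 1
    refine PySem.List.foldl_congr_mem _ _ _ _ ?_
    intro cands i _
    have hA : pvStepA l i (PySem.Int.floordiv 128 b)
        = pvStepAg (fun d => pvBandInt (pvHexBits ((PySem.List.pyGet? l d).getD ""))
            i (PySem.Int.floordiv 128 b)) := by
      funext st d
      rfl
    rw [PySem.List.pyRange_zero_natCast, hA, pvInner_eq]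
    simp only [List.length_map]
    rw [PySem.List.pyRange_zero_natCast]
    refine (PySem.List.foldl_congr_mem _ _ _ _ ?_).symm
    intro c d hd
    obtain ⟨dn, hdn, rfl⟩ := List.mem_map.mp hd
    have hdn' : dn < l.length := List.mem_range.mp hdn
    unfold pvStepB pvStepBg
    refine PySem.List.foldl_congr_mem _ _ _ _ ?_
    intro c' e he
    have he' := PySem.List.mem_pyRange_one.mp he
    obtain ⟨en, rfl⟩ : ∃ en : Nat, e = (en : Int) := ⟨e.toNat, by omega⟩
    have hen : en < l.length := by
      have : (en : Int) < (dn : Int) := he'.2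
      omega
    rw [pvBandAt l i (PySem.Int.floordiv 128 b) en hen,
        pvBandAt l i (PySem.Int.floordiv 128 b) dn hdn']
  · rw [if_pos (by omega), pvRange_neg _ (by omega)]
    rfl
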